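-- pv_equiv track=rewrite | github.com/bradleymont/UCLA-CS-CM122 | stepik/chapter9/9_10/bwMatching/bwMatching.py | findSymbolInterval
-- ===== SOURCE A (Python) =====
-- def findSymbolInterval(symbol, column, offset):
--     top = 0
--     bottom = len(column) - 1
--
--     topIndex = bottomIndex = None
--
--     foundTop = foundBottom = False
--
--     while top <= bottom:
--
--         # check top
--         if column[top] == symbol and not foundTop:
--             topIndex = top + offset
--             foundTop = True
--
--         # check bottom
--         if column[bottom] == symbol and not foundBottom:
--             bottomIndex = bottom + offset
--             foundBottom = True
--
--         # if we found both, exit loop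
--         if foundTop and foundBottom:
--             break
--
--         # only update pointers if we haven't found symbol yet
--         if not foundTop:
--             top += 1
--         if not foundBottom:
--             bottom -= 1
--
--     return topIndex, bottomIndex
-- ===== SOURCE B (Python) =====
-- def findSymbolInterval(symbol, column, offset):
--     first = last = None
--     for i, c in enumerate(column):
--         if c == symbol:
--             if first is None:
--                 first = i
--             last = i
--     if first is None:
--         return None, None
--     return first + offset, last + offset
-- ===== Notes on version B (the rewrite author's own statement) =====
-- stated objective: simpler
-- what changed: Replaced the two-pointer loop with flags and an early break by a single forward enumerate pass that records the first and last matching index.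
import Mathlib
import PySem

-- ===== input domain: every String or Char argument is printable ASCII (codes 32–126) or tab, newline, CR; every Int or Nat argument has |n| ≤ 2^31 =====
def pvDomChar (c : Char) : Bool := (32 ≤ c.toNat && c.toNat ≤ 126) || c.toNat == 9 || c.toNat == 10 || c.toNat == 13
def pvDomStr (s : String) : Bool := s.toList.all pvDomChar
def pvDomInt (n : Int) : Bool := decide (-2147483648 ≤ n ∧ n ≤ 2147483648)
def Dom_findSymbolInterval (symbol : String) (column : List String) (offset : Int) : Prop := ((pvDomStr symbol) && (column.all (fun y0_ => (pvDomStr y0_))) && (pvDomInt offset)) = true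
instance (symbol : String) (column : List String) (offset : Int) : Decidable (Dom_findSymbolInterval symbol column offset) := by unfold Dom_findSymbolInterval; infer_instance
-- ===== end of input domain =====

-- B replaces A's two-pointer scan with found-flags and an early break by one forward
-- enumerate pass recording the first and last matching index (objective: simpler).

-- ===== PORT A =====
-- one "check" block of A's loop body: `if column[i] == symbol and not found:
--   index = i + offset; found = True` — returns the updated (index, found)
def pvCheck (symbol : String) (column : List String) (offset : Int)
    (i : Int) (found : Bool) (cur : Option Int) : Option Int × Bool :=
  if (PySem.List.pyGet? column i == some symbol) && !found then (some (i + offset), true)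
  else (cur, found)

-- the while loop of A: state (top, bottom, topIndex, bottomIndex, foundTop, foundBottom)
def pvLoopA (symbol : String) (column : List String) (offset : Int)
    (top bottom : Int) (tI bI : Option Int) (fT fB : Bool) : Option Int × Option Int :=
  if _h : top ≤ bottom then
    -- check top, check bottom (the two `pvCheck` applications below are the updated
    -- (topIndex, foundTop) resp. (bottomIndex, foundBottom)); if we found both, exit
    -- the loop, else advance exactly the pointers whose symbol was not found yet
    if (pvCheck symbol column offset top fT tI).2 && (pvCheck symbol column offset bottom fB bI).2 then
      ((pvCheck symbol column offset top fT tI).1, (pvCheck symbol column offset bottom fB bI).1)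
    else pvLoopA symbol column offset
      (if (pvCheck symbol column offset top fT tI).2 then top else top + 1)
      (if (pvCheck symbol column offset bottom fB bI).2 then bottom else bottom - 1)
      (pvCheck symbol column offset top fT tI).1 (pvCheck symbol column offset bottom fB bI).1
      (pvCheck symbol column offset top fT tI).2 (pvCheck symbol column offset bottom fB bI).2
  else (tI, bI)
termination_by (bottom - top + 1).toNat
decreasing_by
  rename_i hnb
  cases h1 : (pvCheck symbol column offset top fT tI).2 <;>
    cases h2 : (pvCheck symbol column offset bottom fB bI).2 <;>
      simp [h1, h2] at hnb ⊢ <;> omega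

def findSymbolInterval (symbol : String) (column : List String) (offset : Int) : Option Int × Option Int :=
  pvLoopA symbol column offset 0 ((column.length : Int) - 1) none none false false

-- ===== PORT B =====
def findSymbolInterval_alt (symbol : String) (column : List String) (offset : Int) : Option Int × Option Int :=
  let fl := (PySem.List.enumerate column 0).foldl
    (fun (acc : Option Int × Option Int) (p : Int × String) =>
      if p.2 = symbol then ((match acc.1 with | none => some p.1 | some x => some x), some p.1) else acc)
    (none, none)
  match fl with
  | (some f, some l) => (some (f + offset), some (l + offset))
  | _ => (none, none)

-- ===== PRECONDITION & SPEC =====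
def Spec_findSymbolInterval (symbol : String) (column : List String) (offset : Int) (out : Option Int × Option Int) : Prop := out = findSymbolInterval_alt symbol column offset
instance (symbol : String) (column : List String) (offset : Int) (out : Option Int × Option Int) : Decidable (Spec_findSymbolInterval symbol column offset out) := by unfold Spec_findSymbolInterval; infer_instance

-- ===== CLAIM (what is proved, stated in full; the proofs are below) =====
def Claim_equal_findSymbolInterval : Prop := ∀ (symbol : String) (column : List String) (offset : Int), Dom_findSymbolInterval symbol column offset → Spec_findSymbolInterval symbol column offset (findSymbolInterval symbol column offset)

-- ===== LEMMAS AND PROOFS =====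

-- (first, last) match indices of `symbol`, proof-side reference
def pvFL (symbol : String) : List String → Option (Nat × Nat)
  | [] => none
  | c :: rest =>
    match pvFL symbol rest with
    | none => if c = symbol then some (0, 0) else none
    | some (f, l) => if c = symbol then some (0, l + 1) else some (f + 1, l + 1)

lemma pvFL_cons_none_iff (symbol c : String) (rest : List String) :
    pvFL symbol (c :: rest) = none ↔ c ≠ symbol ∧ pvFL symbol rest = none := by
  cases hr : pvFL symbol rest with
  | none => by_cases hc : c = symbol <;> simp [pvFL, hr, hc]
  | some fl => obtain ⟨f, l⟩ := fl; by_cases hc : c = symbol <;> simp [pvFL, hr, hc]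

lemma pvFL_none_iff (symbol : String) (l : List String) :
    pvFL symbol l = none ↔ ∀ j : Nat, l[j]? ≠ some symbol := by
  induction l with
  | nil => simp [pvFL]
  | cons c rest ih =>
    rw [pvFL_cons_none_iff, ih]
    constructor
    · rintro ⟨hc, hrest⟩ j
      rcases j with _ | j
      · simp [hc]
      · simpa using hrest j
    · intro h
      refine ⟨by simpa using h 0, fun j => by simpa using h (j + 1)⟩

lemma pvFL_some_spec (symbol : String) (l : List String) (f lst : Nat)
    (h : pvFL symbol l = some (f, lst)) :
    l[f]? = some symbol ∧ (∀ j < f, l[j]? ≠ some symbol) ∧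
    l[lst]? = some symbol ∧ (∀ j, lst < j → l[j]? ≠ some symbol) := by
  induction l generalizing f lst with
  | nil => simp [pvFL] at h
  | cons c rest ih =>
    cases hr : pvFL symbol rest with
    | none =>
      have hall := (pvFL_none_iff symbol rest).mp hr
      by_cases hc : c = symbol <;> simp [pvFL, hr, hc] at h
      obtain ⟨hf, hl⟩ := h
      subst hf; subst hl
      refine ⟨by simp [hc], by omega, by simp [hc], ?_⟩
      intro j hj
      rcases j with _ | j
      · omega
      · simpa using hall j
    | some fl =>
      obtain ⟨f', l'⟩ := fl
      obtain ⟨h1, h2, h3, h4⟩ := ih f' l' hr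
      by_cases hc : c = symbol <;> simp [pvFL, hr, hc] at h
      · obtain ⟨hf, hl⟩ := h
        subst hf; subst hl
        refine ⟨by simp [hc], by omega, by simpa using h3, ?_⟩
        intro j hj
        rcases j with _ | j
        · omega
        · exact by simpa using h4 j (by omega)
      · obtain ⟨hf, hl⟩ := h
        subst hf; subst hl
        refine ⟨by simpa using h1, ?_, by simpa using h3, ?_⟩
        · intro j hj
          rcases j with _ | j
          · simpa using hc
          · exact by simpa using h2 j (by omega)
        · intro j hj
          rcases j with _ | j
          · omega
          · exact by simpa using h4 j (by omega)

-- characterisation of B's fold, for any start index and accumulator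
lemma pvFold_char (symbol : String) (l : List String) :
    ∀ (s : Int) (acc : Option Int × Option Int),
    (PySem.List.enumerate l s).foldl
      (fun (acc : Option Int × Option Int) (p : Int × String) =>
        if p.2 = symbol then ((match acc.1 with | none => some p.1 | some x => some x), some p.1) else acc)
      acc =
    (match pvFL symbol l with
     | none => acc
     | some (f, lst) => ((match acc.1 with | none => some (s + f) | some x => some x), some (s + lst))) := by
  induction l with
  | nil => intro s acc; simp [PySem.List.enumerate_nil, pvFL]
  | cons c rest ih =>
    intro s acc
    rw [PySem.List.enumerate_cons, List.foldl_cons, ih]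
    by_cases hc : c = symbol
    · cases hr : pvFL symbol rest with
      | none => cases h1 : acc.1 <;> simp [pvFL, hr, hc, h1] <;> omega
      | some fl =>
        obtain ⟨f, lst⟩ := fl
        cases h1 : acc.1 <;> simp [pvFL, hr, hc, h1] <;> omega
    · cases hr : pvFL symbol rest with
      | none => cases h1 : acc.1 <;> simp [pvFL, hr, hc, h1] <;> omega
      | some fl =>
        obtain ⟨f, lst⟩ := fl
        cases h1 : acc.1 <;> simp [pvFL, hr, hc, h1] <;> omega

lemma alt_eq_none (symbol : String) (column : List String) (offset : Int)
    (h : ∀ j : Nat, column[j]? ≠ some symbol) :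
    findSymbolInterval_alt symbol column offset = (none, none) := by
  have hn : pvFL symbol column = none := (pvFL_none_iff symbol column).mpr h
  simp [findSymbolInterval_alt, pvFold_char, hn]

lemma alt_eq_some (symbol : String) (column : List String) (offset : Int) (f lst : Nat)
    (hf : column[f]? = some symbol) (hf' : ∀ j < f, column[j]? ≠ some symbol)
    (hl : column[lst]? = some symbol) (hl' : ∀ j, lst < j → column[j]? ≠ some symbol) :
    findSymbolInterval_alt symbol column offset = (some ((f : Int) + offset), some ((lst : Int) + offset)) := by
  cases hq : pvFL symbol column with
  | none => exact absurd hf ((pvFL_none_iff symbol column).mp hq f)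
  | some fl =>
    obtain ⟨f', l'⟩ := fl
    obtain ⟨h1, h2, h3, h4⟩ := pvFL_some_spec symbol column f' l' hq
    have hff : f' = f := by
      rcases lt_trichotomy f' f with h | h | h
      · exact absurd h1 (hf' f' h)
      · exact h
      · exact absurd hf (h2 f h)
    have hll : l' = lst := by
      rcases lt_trichotomy l' lst with h | h | h
      · exact absurd hl (h4 lst h)
      · exact h
      · exact absurd h3 (hl' l' h)
    subst hff; subst hll
    simp [findSymbolInterval_alt, pvFold_char, hq]

-- one check-block preserves the single-side invariant
lemma pvCheck_spec (symbol : String) (column : List String) (offset : Int)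
    (i : Int) (found : Bool) (cur : Option Int) (h0 : 0 ≤ i)
    (h1 : found = true → cur = some (i + offset) ∧ column[i.toNat]? = some symbol)
    (h2 : found = false → cur = none) :
    ((pvCheck symbol column offset i found cur).2 = true →
      (pvCheck symbol column offset i found cur).1 = some (i + offset) ∧ column[i.toNat]? = some symbol) ∧
    ((pvCheck symbol column offset i found cur).2 = false →
      (pvCheck symbol column offset i found cur).1 = none ∧ column[i.toNat]? ≠ some symbol) := by
  unfold pvCheck
  rw [PySem.List.pyGet?_of_nonneg column h0]
  cases hm : (column[i.toNat]? == some symbol) <;> cases found <;>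
    simp_all [beq_iff_eq]

-- exit situation: pointers crossed (or break): current state already determines the answer
lemma pvExit (symbol : String) (column : List String) (offset : Int)
    (top bottom : Int) (tI bI : Option Int) (fT fB : Bool)
    (h0 : 0 ≤ top) (hlt : bottom < top)
    (hT1 : fT = true → tI = some (top + offset) ∧ column[top.toNat]? = some symbol)
    (hTpre : ∀ j : Nat, (j : Int) < top → column[j]? ≠ some symbol)
    (hT0 : fT = false → tI = none)
    (hB1 : fB = true → bI = some (bottom + offset) ∧ 0 ≤ bottom ∧ column[bottom.toNat]? = some symbol)
    (hBsuf : ∀ j : Nat, bottom < (j : Int) → column[j]? ≠ some symbol)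
    (hB0 : fB = false → bI = none) :
    (tI, bI) = findSymbolInterval_alt symbol column offset := by
  cases fT with
  | false =>
    have hall : ∀ j : Nat, column[j]? ≠ some symbol := by
      intro j
      by_cases hj : (j : Int) < top
      · exact hTpre j hj
      · exact hBsuf j (by omega)
    have hBf : fB = false := by
      cases fB with
      | false => rfl
      | true =>
        obtain ⟨_, hb0, hbm⟩ := hB1 rfl
        exact absurd hbm (hall bottom.toNat)
    rw [alt_eq_none symbol column offset hall, hT0 rfl, hB0 hBf]
  | true =>
    obtain ⟨htI, htm⟩ := hT1 rfl
    have hBt : fB = true := by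
      cases fB with
      | true => rfl
      | false => exact absurd htm (hBsuf top.toNat (by omega))
    obtain ⟨hbI, hb0, hbm⟩ := hB1 hBt
    rw [alt_eq_some symbol column offset top.toNat bottom.toNat htm
      (fun j hj => hTpre j (by omega)) hbm (fun j hj => hBsuf j (by omega)), htI, hbI]
    simp [Int.toNat_of_nonneg h0, Int.toNat_of_nonneg hb0]

-- the main invariant of A's loop
lemma pvLoopA_eq (symbol : String) (column : List String) (offset : Int) :
    ∀ (m : Nat) (top bottom : Int) (tI bI : Option Int) (fT fB : Bool),
    (bottom - top + 1).toNat ≤ m →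
    0 ≤ top → bottom < (column.length : Int) →
    (fT = true → tI = some (top + offset) ∧ column[top.toNat]? = some symbol) →
    (∀ j : Nat, (j : Int) < top → column[j]? ≠ some symbol) →
    (fT = false → tI = none) →
    (fB = true → bI = some (bottom + offset) ∧ 0 ≤ bottom ∧ column[bottom.toNat]? = some symbol) →
    (∀ j : Nat, bottom < (j : Int) → column[j]? ≠ some symbol) →
    (fB = false → bI = none) →
    pvLoopA symbol column offset top bottom tI bI fT fB = findSymbolInterval_alt symbol column offset := by
  intro m
  induction m with
  | zero =>
    intro top bottom tI bI fT fB hm h0 hb hT1 hTpre hT0 hB1 hBsuf hB0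
    rw [pvLoopA, dif_neg (by omega : ¬ top ≤ bottom)]
    exact pvExit symbol column offset top bottom tI bI fT fB h0 (by omega) hT1 hTpre hT0 hB1 hBsuf hB0
  | succ m ih =>
    intro top bottom tI bI fT fB hm h0 hb hT1 hTpre hT0 hB1 hBsuf hB0
    by_cases h : top ≤ bottom
    · have hbt0 : 0 ≤ bottom := le_trans h0 h
      obtain ⟨hT1', hT0'⟩ := pvCheck_spec symbol column offset top fT tI h0 hT1 hT0
      obtain ⟨hB1', hB0'⟩ := pvCheck_spec symbol column offset bottom fB bI hbt0
        (fun hfb => ⟨(hB1 hfb).1, (hB1 hfb).2.2⟩) hB0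
      rw [pvLoopA, dif_pos h]
      cases hft : (pvCheck symbol column offset top fT tI).2 <;>
        cases hfb : (pvCheck symbol column offset bottom fB bI).2 <;>
          simp only [hft, hfb, Bool.and_true, Bool.true_and, Bool.and_self, if_true, if_false,
            Bool.false_eq_true]
      -- false false : advance both pointers
      · refine ih (top + 1) (bottom - 1) _ _ false false (by omega) (by omega) (by omega)
          (by simp) ?_ (fun _ => (hT0' hft).1) (by simp) ?_ (fun _ => (hB0' hfb).1)
        · intro j hj
          by_cases hj' : (j : Int) < top
          · exact hTpre j hj'
          · have : j = top.toNat := by omega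
            rw [this]; exact (hT0' hft).2
        · intro j hj
          by_cases hj' : bottom < (j : Int)
          · exact hBsuf j hj'
          · have : j = bottom.toNat := by omega
            rw [this]; exact (hB0' hfb).2
      -- false true : only top advances
      · refine ih (top + 1) bottom _ _ false true (by omega) (by omega) hb
          (by simp) ?_ (fun _ => (hT0' hft).1)
          (fun _ => ⟨(hB1' hfb).1, hbt0, (hB1' hfb).2⟩) hBsuf (by simp)
        intro j hj
        by_cases hj' : (j : Int) < top
        · exact hTpre j hj'
        · have : j = top.toNat := by omega
          rw [this]; exact (hT0' hft).2
      -- true false : only bottom advances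
      · refine ih top (bottom - 1) _ _ true false (by omega) h0 (by omega)
          (fun _ => hT1' hft) hTpre (by simp) (by simp) ?_ (fun _ => (hB0' hfb).1)
        intro j hj
        by_cases hj' : bottom < (j : Int)
        · exact hBsuf j hj'
        · have : j = bottom.toNat := by omega
          rw [this]; exact (hB0' hfb).2
      -- true true : break
      · obtain ⟨htI, htm⟩ := hT1' hft
        obtain ⟨hbI, hbm⟩ := hB1' hfb
        rw [alt_eq_some symbol column offset top.toNat bottom.toNat htm
          (fun j hj => hTpre j (by omega)) hbm (fun j hj => hBsuf j (by omega)), htI, hbI]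
        simp [Int.toNat_of_nonneg h0, Int.toNat_of_nonneg hbt0]
    · rw [pvLoopA, dif_neg h]
      exact pvExit symbol column offset top bottom tI bI fT fB h0 (by omega) hT1 hTpre hT0 hB1 hBsuf hB0

-- ===== VERDICT (by name: the statement is the Claim_ definition above) =====
theorem findSymbolInterval_spec : Claim_equal_findSymbolInterval := by
  intro symbol column offset _
  unfold Spec_findSymbolInterval findSymbolInterval
  exact pvLoopA_eq symbol column offset ((column.length : Int) - 0 + 1).toNat 0 ((column.length : Int) - 1)
    none none false false (by omega) le_rfl (by omega)
    (by simp) (by intro j hj; omega) (fun _ => rfl)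
    (by simp)
    (by intro j hj; exact by simp [List.getElem?_eq_none (by omega : column.length ≤ j)])
    (fun _ => rfl)
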